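-- pv_equiv track=rewrite | github.com/spongebobx18/DSA-problem-solving- | balace.py | max_balanced_team
-- ===== SOURCE A (Python) =====
-- def max_balanced_team(n, skills):
--     skills.sort()  # Sort the skills in ascending order.
--     max_students = 1  # The minimum possible team size is 1 (one student).
--
--     left, right = 0, 1
--     while right < n:
--         if skills[right] - skills[left] <= 5:
--             max_students = max(max_students, right - left + 1)
--             right += 1
--         else:
--             left += 1
--
--     return max_students
-- ===== SOURCE B (Python) =====
-- import bisect
--
-- def max_balanced_team(n, skills):
--     skills.sort()
--     max_students = 1
--     for i in range(n):
--         j = bisect.bisect_right(skills, skills[i] + 5, i, n) - 1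
--         max_students = max(max_students, j - i + 1)
--     return max_students
-- ===== Notes on version B (the rewrite author's own statement) =====
-- stated objective: alternative
-- what changed: Replaced A's linear two-pointer sliding-window scan with a per-index bisect_right binary search (bounds lo=i, hi=n) that finds each window's right edge directly on the sorted list.
-- outside the precondition, e.g. on max_balanced_team(1, []): A returns 1, B raises IndexError
import Mathlib
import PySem

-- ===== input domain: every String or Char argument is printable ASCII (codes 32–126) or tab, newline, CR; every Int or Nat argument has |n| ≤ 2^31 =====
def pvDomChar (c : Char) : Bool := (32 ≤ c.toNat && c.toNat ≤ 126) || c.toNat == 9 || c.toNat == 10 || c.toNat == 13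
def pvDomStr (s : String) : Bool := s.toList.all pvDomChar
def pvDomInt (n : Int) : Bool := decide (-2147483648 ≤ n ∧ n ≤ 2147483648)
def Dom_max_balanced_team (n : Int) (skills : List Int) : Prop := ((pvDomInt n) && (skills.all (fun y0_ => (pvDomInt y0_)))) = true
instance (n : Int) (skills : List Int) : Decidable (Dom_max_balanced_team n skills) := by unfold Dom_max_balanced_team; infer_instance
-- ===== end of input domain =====

-- B replaces A's linear two-pointer scan by a per-index bisect_right binary search for each
-- window's right edge (alternative decomposition, same sort-dominated cost). Both A and B sort
-- `skills` in place in Python; the equivalence proved here is about the return value.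

-- ===== PORT A =====
-- the while-loop of A; the fuel argument only makes the recursion total (each iteration
-- advances left or right, so (2*n).toNat steps always suffice)
def aLoop (s : List Int) (n : Int) : Nat → Int → Int → Int → Int
  | 0, ms, _, _ => ms
  | fuel+1, ms, l, r =>
    if r < n then
      if PySem.List.pyGetD s r 0 - PySem.List.pyGetD s l 0 ≤ 5 then
        aLoop s n fuel (max ms (r - l + 1)) l (r + 1)
      else
        aLoop s n fuel ms (l + 1) r
    else ms

def max_balanced_team (n : Int) (skills : List Int) : Int :=
  aLoop (PySem.List.sorted skills (fun x => x)) n (2 * n).toNat 1 0 1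

-- ===== PORT B =====
-- bisect.bisect_right(skills, x, i, n) is PySem's bisect loop with bounds lo = i, hi = n
def max_balanced_team_alt (n : Int) (skills : List Int) : Int :=
  (PySem.List.pyRange 0 n 1).foldl
    (fun ms i =>
      let j : Int :=
        (PySem.List.bisectRightLoop (PySem.List.sorted skills (fun x => x))
          (PySem.List.pyGetD (PySem.List.sorted skills (fun x => x)) i 0 + 5)
          (PySem.List.sorted skills (fun x => x)).length i.toNat n.toNat : Int) - 1
      max ms (j - i + 1)) 1

-- ===== PRECONDITION & SPEC =====
-- Pre_ excludes n > len(skills), where the scans index past the end: A raises IndexError there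
-- except in the single case n = 1 with skills = [] (A returns 1, B's skills[0] access raises).
def Pre_max_balanced_team (n : Int) (skills : List Int) : Prop := n ≤ (skills.length : Int)
instance (n : Int) (skills : List Int) : Decidable (Pre_max_balanced_team n skills) := by
  unfold Pre_max_balanced_team; infer_instance

def pvWitness_max_balanced_team : Int × List Int := (2, [1, 10])

def Spec_max_balanced_team (n : Int) (skills : List Int) (out : Int) : Prop := out = max_balanced_team_alt n skills
instance (n : Int) (skills : List Int) (out : Int) : Decidable (Spec_max_balanced_team n skills out) := by unfold Spec_max_balanced_team; infer_instance

-- ===== CLAIM (what is proved, stated in full; the proofs are below) =====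
def Claim_equal_max_balanced_team : Prop := ∀ (n : Int) (skills : List Int), Dom_max_balanced_team n skills → Pre_max_balanced_team n skills → Spec_max_balanced_team n skills (max_balanced_team n skills)

-- ===== LEMMAS AND PROOFS =====

-- minimal left index whose skill is within 5 of s[j] (proof-side only)
def LL (s : List Int) (j : Nat) : Nat :=
  Nat.find (p := fun i => s.getD j 0 - s.getD i 0 ≤ 5) ⟨j, by omega⟩

-- width of the maximal balanced window with right end j
def wA (s : List Int) (j : Nat) : Nat := j + 1 - LL s j

-- width of the maximal balanced window with left end i (as computed via bisect)
def wB (s : List Int) (m i : Nat) : Nat :=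
  PySem.List.bisectRightLoop s (s.getD i 0 + 5) s.length i m - i

lemma getD_mono (s : List Int) (hs : s.Pairwise (· ≤ ·)) {i j : Nat} (hij : i ≤ j)
    (hj : j < s.length) : s.getD i 0 ≤ s.getD j 0 := by
  rcases Nat.eq_or_lt_of_le hij with rfl | h
  · exact le_refl _
  · rw [List.getD_eq_getElem _ _ (Nat.lt_trans h hj), List.getD_eq_getElem _ _ hj]
    exact List.pairwise_iff_getElem.mp hs i j (Nat.lt_trans h hj) hj h

lemma LL_le (s : List Int) (j : Nat) : LL s j ≤ j :=
  Nat.find_le (by omega)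

lemma LL_spec (s : List Int) (j : Nat) : s.getD j 0 - s.getD (LL s j) 0 ≤ 5 :=
  Nat.find_spec (p := fun i => s.getD j 0 - s.getD i 0 ≤ 5) ⟨j, by omega⟩

-- correctness of PySem's bounded bisect_right loop on a sorted list
lemma bisectLoop_spec (s : List Int) (x : Int) (hs : s.Pairwise (· ≤ ·)) :
    ∀ (fuel lo hi : Nat), lo ≤ hi → hi ≤ s.length → hi - lo ≤ fuel →
      lo ≤ PySem.List.bisectRightLoop s x fuel lo hi ∧
      PySem.List.bisectRightLoop s x fuel lo hi ≤ hi ∧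
      (∀ j, lo ≤ j → j < PySem.List.bisectRightLoop s x fuel lo hi → s.getD j 0 ≤ x) ∧
      (∀ j, PySem.List.bisectRightLoop s x fuel lo hi ≤ j → j < hi → x < s.getD j 0) := by
  intro fuel
  induction fuel with
  | zero =>
    intro lo hi hlohi hhi hf
    have : lo = hi := by omega
    subst this
    rw [PySem.List.bisectRightLoop]
    refine ⟨le_refl _, by omega, ?_, ?_⟩ <;> intro j h1 h2 <;> omega
  | succ fuel ih =>
    intro lo hi hlohi hhi hf
    by_cases hlt : lo < hi
    · have hmid1 : lo ≤ (lo + hi) / 2 := by omega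
      have hmid2 : (lo + hi) / 2 < hi := by omega
      have hmlen : (lo + hi) / 2 < s.length := by omega
      have hget : s[(lo + hi) / 2]? = some s[(lo + hi) / 2] := List.getElem?_eq_getElem hmlen
      have hgetD : s[(lo + hi) / 2] = s.getD ((lo + hi) / 2) 0 := (List.getD_eq_getElem _ _ hmlen).symm
      rw [PySem.List.bisectRightLoop, if_pos hlt, hget]
      dsimp only
      by_cases hx : x < s[(lo + hi) / 2]
      · rw [if_pos hx]
        obtain ⟨h1, h2, h3, h4⟩ := ih lo ((lo + hi) / 2) hmid1 (by omega) (by omega)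
        refine ⟨h1, by omega, h3, ?_⟩
        intro j hbj hjhi
        by_cases hjm : j < (lo + hi) / 2
        · exact h4 j hbj hjm
        · calc x < s[(lo + hi) / 2] := hx
            _ = s.getD ((lo + hi) / 2) 0 := hgetD
            _ ≤ s.getD j 0 := getD_mono s hs (by omega) (by omega)
      · rw [if_neg hx]
        obtain ⟨h1, h2, h3, h4⟩ := ih ((lo + hi) / 2 + 1) hi (by omega) hhi (by omega)
        refine ⟨by omega, h2, ?_, h4⟩
        intro j hloj hjb
        by_cases hjm : (lo + hi) / 2 + 1 ≤ j
        · exact h3 j hjm hjb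
        · calc s.getD j 0 ≤ s.getD ((lo + hi) / 2) 0 := getD_mono s hs (by omega) hmlen
            _ = s[(lo + hi) / 2] := hgetD.symm
            _ ≤ x := le_of_not_gt hx
    · have : lo = hi := by omega
      subst this
      rw [PySem.List.bisectRightLoop, if_neg hlt]
      refine ⟨le_refl _, by omega, ?_, ?_⟩ <;> intro j h1 h2 <;> omega

lemma wB_facts (s : List Int) (m i : Nat) (hs : s.Pairwise (· ≤ ·)) (hm : m ≤ s.length)
    (him : i < m) :
    i + 1 ≤ PySem.List.bisectRightLoop s (s.getD i 0 + 5) s.length i m ∧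
    PySem.List.bisectRightLoop s (s.getD i 0 + 5) s.length i m ≤ m ∧
    (∀ j, i ≤ j → j < PySem.List.bisectRightLoop s (s.getD i 0 + 5) s.length i m →
      s.getD j 0 ≤ s.getD i 0 + 5) ∧
    (∀ j, PySem.List.bisectRightLoop s (s.getD i 0 + 5) s.length i m ≤ j → j < m →
      s.getD i 0 + 5 < s.getD j 0) := by
  obtain ⟨h1, h2, h3, h4⟩ :=
    bisectLoop_spec s (s.getD i 0 + 5) hs s.length i m (by omega) hm (by omega)
  refine ⟨?_, h2, h3, h4⟩
  by_contra hb
  have hbi : PySem.List.bisectRightLoop s (s.getD i 0 + 5) s.length i m ≤ i := by omega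
  have := h4 i hbi him
  omega

lemma sup_Ico_split (f : Nat → Nat) (r m : Nat) (h : r < m) :
    (Finset.Ico r m).sup f = f r ⊔ (Finset.Ico (r+1) m).sup f := by
  rw [← Finset.sup_insert, Finset.insert_Ico_add_one_left_eq_Ico h]

-- the two-pointer loop computes the best window ending at each index ≥ r
lemma aLoop_eq (s : List Int) (n : Int) (m : Nat) (hn : (m : Int) = n) (hm : m ≤ s.length)
    (hs : s.Pairwise (· ≤ ·)) :
    ∀ (fuel l r : Nat) (ms : Int), l ≤ r → 1 ≤ ms → m - l + (m - r) < fuel →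
      (∀ i j : Nat, i < l → r ≤ j → j < m → 5 < s.getD j 0 - s.getD i 0) →
      aLoop s n fuel ms (l : Int) (r : Int) = ms ⊔ (((Finset.Ico r m).sup (wA s) : Nat) : Int) := by
  intro fuel
  induction fuel with
  | zero => intro l r ms _ _ hf _; omega
  | succ fuel ih =>
    intro l r ms hlr hms hf hinv
    by_cases hrm : r < m
    · have hrn : (r : Int) < n := by rw [← hn]; exact_mod_cast hrm
      rw [aLoop, if_pos hrn]
      simp only [PySem.List.pyGetD_natCast]
      by_cases hc : s.getD r 0 - s.getD l 0 ≤ 5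
      · rw [if_pos hc]
        have hLL : LL s r = l := by
          have hub : LL s r ≤ l := Nat.find_le hc
          have hlb : ¬ (LL s r < l) := by
            intro hlt
            have h1 := hinv (LL s r) r hlt (le_refl r) hrm
            have h2 := LL_spec s r
            omega
          omega
        have hwa : (wA s r : Int) = (r : Int) - (l : Int) + 1 := by
          unfold wA; rw [hLL]; omega
        have hstep : ((r : Int) + 1) = ((r + 1 : Nat) : Int) := by push_cast; ring
        rw [hstep]
        rw [ih l (r+1) (max ms ((r:Int) - (l:Int) + 1)) (by omega)
          (le_trans hms (le_max_left _ _)) (by omega)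
          (fun i j hi hj hjm => hinv i j hi (by omega) hjm)]
        rw [sup_Ico_split (wA s) r m hrm]
        simp only [Nat.cast_max]
        rw [hwa]
        rw [max_assoc]
      · rw [if_neg hc]
        have hlr' : l < r := by
          rcases Nat.eq_or_lt_of_le hlr with rfl | h
          · exfalso; exact hc (by omega)
          · exact h
        have hstep : ((l : Int) + 1) = ((l + 1 : Nat) : Int) := by push_cast; ring
        rw [hstep]
        apply ih (l+1) r ms (by omega) hms (by omega)
        intro i j hi hj hjm
        by_cases hil : i < l
        · exact hinv i j hil hj hjm
        · have : i = l := by omega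
          subst this
          have hmono : s.getD r 0 ≤ s.getD j 0 := getD_mono s hs hj (by omega)
          omega
    · have hrn : ¬ ((r : Int) < n) := by rw [← hn]; exact_mod_cast hrm
      rw [aLoop, if_neg hrn]
      rw [Finset.Ico_eq_empty (by omega)]
      simp
      omega

lemma foldl_max_sup (f : Nat → Nat) :
    ∀ m : Nat, (List.range m).foldl (fun ms k => max ms ((f k : Nat) : Int)) 1
      = 1 ⊔ (((Finset.range m).sup f : Nat) : Int) := by
  intro m
  induction m with
  | zero => simp
  | succ m ih =>
    rw [List.range_succ, List.foldl_append, List.foldl_cons, List.foldl_nil, ih,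
      Finset.range_add_one, Finset.sup_insert]
    simp only [Nat.cast_max]
    omega

-- the best window parametrized by right ends equals the best parametrized by left ends
lemma sup_eq (s : List Int) (m : Nat) (hs : s.Pairwise (· ≤ ·)) (hm : m ≤ s.length) :
    (1 ⊔ (Finset.Ico 1 m).sup (wA s)) = (1 ⊔ (Finset.range m).sup (wB s m)) := by
  apply le_antisymm
  · apply max_le (le_max_left _ _)
    apply Finset.sup_le
    intro j hj
    rw [Finset.mem_Ico] at hj
    have hLLj : LL s j < m := lt_of_le_of_lt (LL_le s j) hj.2
    obtain ⟨h1, h2, h3, h4⟩ := wB_facts s m (LL s j) hs hm hLLj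
    have hjb : j + 1 ≤ PySem.List.bisectRightLoop s (s.getD (LL s j) 0 + 5) s.length (LL s j) m := by
      by_contra hb
      have := h4 j (by omega) hj.2
      have := LL_spec s j
      omega
    have hle : wA s j ≤ wB s m (LL s j) := by
      unfold wA wB
      have := LL_le s j
      omega
    exact le_trans hle (le_trans (Finset.le_sup (Finset.mem_range.mpr hLLj)) (le_max_right _ _))
  · apply max_le (le_max_left _ _)
    apply Finset.sup_le
    intro i hi
    rw [Finset.mem_range] at hi
    obtain ⟨h1, h2, h3, h4⟩ := wB_facts s m i hs hm hi
    set b := PySem.List.bisectRightLoop s (s.getD i 0 + 5) s.length i m with hb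
    by_cases hb1 : b ≤ 1
    · have : wB s m i ≤ 1 := by unfold wB; omega
      exact le_trans this (le_max_left _ _)
    · have hj1 : 1 ≤ b - 1 := by omega
      have hjm : b - 1 < m := by omega
      have hLLb : LL s (b - 1) ≤ i := by
        apply Nat.find_le
        have := h3 (b - 1) (by omega) (by omega)
        omega
      have hle : wB s m i ≤ wA s (b - 1) := by
        unfold wA wB
        omega
      exact le_trans hle
        (le_trans (Finset.le_sup (Finset.mem_Ico.mpr ⟨hj1, hjm⟩)) (le_max_right _ _))

-- ===== VERDICT (by name: the statement is the Claim_ definition above) =====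
theorem max_balanced_team_spec : Claim_equal_max_balanced_team := by
  intro n skills _ hpre
  unfold Spec_max_balanced_team max_balanced_team max_balanced_team_alt
  unfold Pre_max_balanced_team at hpre
  have hs : (PySem.List.sorted skills (fun x => x)).Pairwise (· ≤ ·) :=
    PySem.List.sorted_pairwise skills (fun x => x)
  have hlen : (PySem.List.sorted skills (fun x => x)).length = skills.length :=
    PySem.List.length_sorted skills _ _
  set s := PySem.List.sorted skills (fun x => x) with hsdef
  by_cases hn0 : n ≤ 0
  · have h2n : (2 * n).toNat = 0 := by omega
    rw [h2n, PySem.List.pyRange_one]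
    have h0 : (n - 0).toNat = 0 := by omega
    rw [h0]
    rfl
  · obtain ⟨m, hn⟩ : ∃ mm : Nat, (mm : Int) = n := ⟨n.toNat, by omega⟩
    have hmn : n.toNat = m := by omega
    have hm1 : 1 ≤ m := by omega
    have hm : m ≤ s.length := by omega
    -- A side
    have hA := aLoop_eq s n m hn hm hs ((2*n).toNat) 0 1 1 (by omega) (le_refl 1)
      (by omega) (by intro i j hi hj hjm; omega)
    simp only [Nat.cast_zero, Nat.cast_one] at hA
    rw [hA]
    -- B side
    rw [PySem.List.pyRange_one]
    have h0 : (n - 0).toNat = m := by omega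
    rw [h0, List.foldl_map]
    rw [PySem.List.foldl_congr_mem _ _ (fun ms k => max ms ((wB s m k : Nat) : Int)) 1 ?_]
    · rw [foldl_max_sup (wB s m) m]
      have h2 : ((1 ⊔ (Finset.Ico 1 m).sup (wA s) : Nat) : Int)
          = ((1 ⊔ (Finset.range m).sup (wB s m) : Nat) : Int) :=
        congrArg (fun x : Nat => (x : Int)) (sup_eq s m hs hm)
      push_cast at h2
      exact h2
    · intro acc k hk
      rw [List.mem_range] at hk
      dsimp only
      rw [zero_add]
      simp only [PySem.List.pyGetD_natCast, Int.toNat_natCast]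
      rw [hmn]
      obtain ⟨h1, h2, h3, h4⟩ := wB_facts s m k hs hm hk
      have hcast : ((PySem.List.bisectRightLoop s (s.getD k 0 + 5) s.length k m : Nat) : Int)
          - 1 - (k : Int) + 1 = ((wB s m k : Nat) : Int) := by
        unfold wB
        omega
      rw [hcast]
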